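/- GENERATED by mk_final_copies.py from the proof of the farm's unit `start_decoder.R7b` (farm:start_decoder.R7b.1: Proof.lean) as the
   re-elaboration sweep compiled it — do not edit. -/
import Asan.CheckWalk
import Vorbis.Spec.Units.start_decoder_R7b
import Vorbis.Spec.StartDecoderR7
import Vorbis.Spec.Worked.start_decoder_R7b_Lemmas

open X86 X86.User Asan Vorbis Vorbis.Spec Vorbis.Spec.StartDecoder

set_option maxRecDepth 4000
set_option maxHeartbeats 4000000

namespace Vorbis.Spec.start_decoder_R7b

/-- **Segment R7b of `start_decoder`** (`cut266` 0x115e3c … 0x115e88 / 0x115e7f): the returned pointer is spilled to the qword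
`[R + 18H]`, stored into `classdata[j]` (check site 0x115e44: store8 inside the `classdata` table, `j < E`), `&r->classdata` is
reloaded from `[R + 30H]` (check site 0x115e57: load8 inside record `i`), `classdata[j]` is re-loaded (check site 0x115e66) and
tested. NULL (`AllocRet`'s failure arm): `error(f, 3)`, then `jmp 113b22`: `AtERR` by `row_fail`. Else `r12d = W − 1`
(`kword_lea`), `[R + 18H] := r13d` (`temp = j`): the head of loop 4084 with `n = W`, all by `R7.row_start`. -/
theorem segR7b_walk {Lay : Layout} (hLay : Lay.hi = 0x1000000) {μ : Microarch} (hμ : UserX.MicroOK μ) {u₀ : State}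
    (hcode : HasCodeNat Lay u₀ Vorbis.L.start_decoder.entry Vorbis.Code.code_start_decoder.nat Vorbis.L.start_decoder.size)
    (hload8 : Asan.SmallCheck Lay μ Vorbis.WayInv (Vorbis.CodeOK u₀) [.rax, .rcx, .rdx] 8 Vorbis.L.__asan_load8_noabort.entry)
    (hstore8 : Asan.SmallCheck Lay μ Vorbis.WayInv (Vorbis.CodeOK u₀) [.rax, .rcx, .rdx] 8 Vorbis.L.__asan_store8_noabort.entry)
    (h_error : ∀ (others : List Obj) (frames : List (Nat × FrameLayout)),
      Calls Lay μ Vorbis.WayInv (Vorbis.conv u₀) Vorbis.L.error.entry (Vorbis.Spec.error.spec others frames))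
    {g : Ghost} {i j E : Nat} {v : State} {A6 A6c Ai Ak Ad : Arena} {A A' : Arena × List Obj}
    (hb : BodyR7Row u₀ g i j E A6 A6c Ai Ak Ad A A' v) :
    ReachVia Lay μ WayInv v (fun w => (∃ n, AtR7K u₀ g i j E n w) ∨ AtERR u₀ g w) := by
  -- 1. the parts of the entry assertion (cut266 = 0x115e3c, stb_vorbis_fixed.c:4082) and the ENTRY state's facts
  have hloop := hb.loop
  have hfr := hloop.frame
  have hh := hloop.hand
  have hm := hloop.mid
  have hp : Pos g A' := Pos.of_mid hfr hh hm
  have he := hfr.entry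
  v_entry he
  obtain ⟨hRa, hR8⟩ := hfr.r_eq
  simp only [steady, Ghost.RA] at hRa
  simp only [depth] at he_room he_stack
  have hflo := hp.f_lo
  have hf2 := hp.f_hi
  have hf3 := hp.f_stack
  simp only [Ghost.RA] at hf3
  -- 2. the PRESENT state's facts: `w_rip`, the registers as `c_…` (rewrite rules of the whole walk), code span, DF / MXCSR
  have hRn : (addr g.R).toNat = g.R := toNat_addr _ (by omega)
  have hfn : (addr g.f).toNat = g.f := toNat_addr _ (by omega)
  have w_rip := hfr.rip
  have c_rsp := hfr.rsp
  have c_rbp := hb.rbp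
  have c_rbx := hb.rbx
  have c_r13 := hb.r13
  have c_r14 := hb.r14
  have c_r12 := hb.r12
  have c_r15 := hb.r15
  have w_eq : Mem.EqOn Vorbis.L.textLo Vorbis.L.textHi u₀.mem v.mem := hfr.code
  have hdf : v.flags .df = false := (show abiInv _ from hfr.inv).1
  have hmx : v.mxcsr &&& 0x1F80 = 0x1F80 := (show abiInv _ from hfr.inv).2
  have hsse := Vorbis.sseOK_of_abiInv hfr.inv
  have herr := h_error A'.2 g.frames'
  -- 3. where record `i` (`r`) and the `classdata` table (`cd`) are, as arithmetic over the ghost numbers `r`, `cd`, `W`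
  obtain ⟨⟨r1, r2, r3⟩, ⟨d1, d2, d3⟩, d4⟩ := row_geo hb
  have hjE := hb.j_lt
  obtain ⟨di1, di2⟩ := row_cd_inside hb
  have k30 := hb.slot30
  obtain ⟨r, hr⟩ : ∃ r, resAt g v.mem i = r := ⟨_, rfl⟩
  rw [hr] at r1 r2 r3 d1 d2 d3 d4 di1 di2 c_rbx c_r12 c_r15 k30
  obtain ⟨cd, hcd⟩ : ∃ cd, Residue.classdata v.mem r = cd := ⟨_, rfl⟩
  rw [hcd] at d1 d2 d3 d4 di1 di2 c_r12
  obtain ⟨W, hW⟩ : ∃ W, Residue.W v.mem g.f r = W := ⟨_, rfl⟩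
  rw [hW] at c_r15
  have hWlt : W < 2 ^ 32 := by
    rw [← hW]
    exact row_W_lt _ _ _
  -- 4. the two loads of the segment, named: `[rbx + 10H]` = `r->classdata`, `[R + 30H]` = `&r->classdata`
  have kcd : v.mem.readLE (addr r + 16) 8 = cd := by
    rw [← hcd]
    simp only [vacc, voff]
    unfold Mem.u64
    rw [← addr_add_lit]
  unfold Mem.u64 at k30
  rw [← addr_add_lit] at k30
  have hrn : (addr r).toNat = r := toNat_addr _ (by omega)
  have hcn : (addr (cd + 8 * j)).toNat = cd + 8 * j := toNat_addr _ (by omega)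
  have hjn : (addr (8 * j)).toNat = 8 * j := toNat_addr _ (by omega)
  have hcdn : (UInt64.ofNat cd).toNat = cd := toNat_addr _ (by omega)
  -- `mov r12, r14 ; add r12, [rbx + 10H]` (0x115e5c): `8j + classdata` is `&classdata[j]` again
  have hadd : addr (8 * j) + UInt64.ofNat cd = addr (cd + 8 * j) := by
    rw [addr_add, Nat.add_comm]
  -- 5. the walk: 0x115e3c … the `jne` 0x115e70; arm 1 to loop32 (0x115e8d), arm 2 to the return of `error` (0x115e7f)
  u_walk hcode [hμ.vendor, hadd] until [Vorbis.L.start_decoder.loop32, Vorbis.L.start_decoder.cut4] span [Vorbis.L.textLo, Vorbis.L.textHi] side (v_side)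
  case check_115e44 =>
    -- 0x115e44: the store of `classdata[j]` lies inside the `classdata` table
    have hun : ShadowUntouched v.mem s_115e44.mem := by v_untouched
    apply row_check_cd hb hun
    rw [hr, hcd]
    exact hcn
  case check_115e57 =>
    -- 0x115e57: the load of `r->classdata` (r + 16) lies inside record `i`
    have hun : ShadowUntouched v.mem s_115e57.mem := by v_untouched
    apply row_check_r hb hun _ 16 8 ?_ (by decide) (by decide)
    rw [hr]
    exact toNat_addr _ (by omega)
  case check_115e66 =>
    -- 0x115e66: the load of `classdata[j]`
    have hun : ShadowUntouched v.mem s_115e66.mem := by v_untouched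
    apply row_check_cd hb hun
    rw [hr, hcd]
    exact hcn
  case call_inv => v_inv
  case pre_115e7a =>
    -- 0x115e7a: `error(f, VORBIS_outofmem)`
    have hun : ShadowUntouched v.mem s_115e7a.mem := by v_untouched
    refine ⟨shadowPre_call hfr (by rw [w_rsp]; u_omega) hun, ?_⟩
    rw [w_rdi, hfn]
    exact hh.obj.mono (frames'_sub g A'.2)
  case cont =>
    -- THE SUCCESS ARM (0x115e84 – 0x115e88): `r12d = W − 1`, `temp = j`; the head of loop 4084 by `R7.row_start`
    have hne : v.reg .rax ≠ 0 := by
      intro e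
      apply hbr_115e70
      rw [e]
      rfl
    have hun : ShadowUntouched v.mem s_115e88.mem := by v_untouched
    have hs : Mem.SameExcept [⟨g.R - 8, g.R⟩, ⟨g.R + 0x18, g.R + 0x20⟩, ⟨cd + 8 * j, cd + 8 * j + 8⟩]
        v.mem s_115e88.mem := by u_same
    have hok : ∀ x, x ∈ [(⟨g.R - 8, g.R⟩ : Span), ⟨g.R + 0x18, g.R + 0x20⟩, ⟨cd + 8 * j, cd + 8 * j + 8⟩] →
        (g.R - 408 ≤ x.lo ∧ x.hi ≤ g.R + 8) ∨ (g.R + 0x18 ≤ x.lo ∧ x.hi ≤ g.R + 0x20) ∨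
        (x.lo = Residue.classdata v.mem (resAt g v.mem i) + 8 * j ∧
          x.hi = Residue.classdata v.mem (resAt g v.mem i) + 8 * j + 8) := by
      intro x hx
      rw [hr, hcd]
      simp only [List.mem_cons, List.mem_nil_iff, or_false] at hx
      rcases hx with rfl | rfl | rfl
      · left
        simp only []
        omega
      · right
        left
        simp only []
        omega
      · right
        right
        exact ⟨rfl, rfl⟩
    -- the row pointer reads back as the returned block
    have hcd' : s_115e88.mem.readLE (addr r + 16) 8 = cd := by
      rw [w_mem]
      u_frame kcd
    have hrow' : s_115e88.mem.readLE (addr (cd + 8 * j)) 8 = (v.reg .rax).toNat := by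
      rw [w_mem]
      u_read
    have hval : Residue.row s_115e88.mem (resAt g v.mem i) j = (v.reg .rax).toNat := by
      rw [hr]
      simp only [Residue.row, Residue.classdata, Mem.ptr_eq, voff]
      unfold Mem.u64
      rw [← addr_add_lit, hcd']
      exact hrow'
    -- `temp = j`
    have htemp : StartDecoder.slot g s_115e88.mem 0x18 ≤ j := by
      have h18 : s_115e88.mem.readLE (addr g.R + 24) 4 = (Word.part .w32 (addr j)).toNat % 256 ^ 4 := by
        rw [w_mem]
        exact Mem.readLE_writeLE_same' _ _ 4 _ (by decide)
      unfold StartDecoder.slot Mem.u32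
      rw [← addr_add_lit, h18, Vorbis.toNat_part32]
      unfold addr
      rw [UInt64.toNat_ofNat']
      omega
    -- `Bits f`: no window meets a field of the reader
    have hbits : Bits (g.Blk A') g.len s_115e88.mem g.f := by
      apply bits_kept hp hm.bits hs
      intro x hx
      simp only [List.mem_cons, List.mem_nil_iff, or_false] at hx
      rcases hx with rfl | rfl | rfl
      · left
        simp only []
        omega
      · left
        simp only []
        omega
      · right
        left
        simp only []
        omega
    have habi : abiInv s_115e88 := by
      refine Vorbis.abiInv_of ?_ ?_
      · rw [w_flags]
        simp only [X86.User.df_setStatus]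
        exact w_df_115e66
      · rw [w_mxcsr]
        exact hmx
    have hr12 : s_115e88.reg .r12 = R7.kword (Residue.W v.mem g.f (resAt g v.mem i)) := by
      rw [hr, hW, w_r12]
      exact kword_lea W hWlt
    have hk := R7.row_start hb hne hs hun hok hval htemp hbits w_rip w_rsp w_eq habi (w_kept.get .rbp rfl)
      (w_kept.get .rbx rfl) (w_kept.get .r13 rfl) (w_kept.get .r14 rfl) hr12
    exact ReachVia.done (Or.inl ⟨_, A6, A6c, Ai, Ak, Ad, A.1, A', hk⟩)
  case cont =>
    -- THE FAILURE ARM: the returned state of `error` (0x115e7f), then `jmp 113b22`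
    have hrax0 : s_115e7ar.reg .rax = 0 := w_post.1
    have hunB : ShadowUntouched s_115e7a.mem s_115e7ar.mem := w_post.2.1
    v_after_call w_rsp_115e7a w_mem_115e7a
    simp only [w_rdi_115e7a] at w_same
    -- the footprint from cut266 to the return of `error`: the pushes and `error`'s frame, the spill, `classdata[j]`, `f->error`
    have hun : ShadowUntouched v.mem s_115e7ar.mem := by v_untouched
    have hs : Mem.SameExcept [⟨g.R - 56, g.R⟩, ⟨g.R + 0x18, g.R + 0x20⟩, ⟨cd + 8 * j, cd + 8 * j + 8⟩,
        ⟨g.f + 140, g.f + 144⟩] v.mem s_115e7ar.mem := by u_same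
    have hok : ∀ x, x ∈ [(⟨g.R - 56, g.R⟩ : Span), ⟨g.R + 0x18, g.R + 0x20⟩, ⟨cd + 8 * j, cd + 8 * j + 8⟩,
        ⟨g.f + 140, g.f + 144⟩] →
        (g.R - 408 ≤ x.lo ∧ x.hi ≤ g.R + 8) ∨ (g.R + 0x18 ≤ x.lo ∧ x.hi ≤ g.R + 0x20) ∨
        (x.lo = Residue.classdata v.mem (resAt g v.mem i) + 8 * j ∧
          x.hi = Residue.classdata v.mem (resAt g v.mem i) + 8 * j + 8) ∨
        (g.f + 140 ≤ x.lo ∧ x.hi ≤ g.f + 144) := by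
      intro x hx
      rw [hr, hcd]
      simp only [List.mem_cons, List.mem_nil_iff, or_false] at hx
      rcases hx with rfl | rfl | rfl | rfl
      · left
        simp only []
        omega
      · right
        left
        simp only []
        omega
      · right
        right
        left
        exact ⟨rfl, rfl⟩
      · right
        right
        right
        simp only []
        omega
    -- `Bits f`: no window meets a field of the reader
    have hbits : Bits (g.Blk A') g.len s_115e7ar.mem g.f := by
      apply bits_kept hp hm.bits hs
      intro x hx
      simp only [List.mem_cons, List.mem_nil_iff, or_false] at hx
      rcases hx with rfl | rfl | rfl | rfl
      · left
        simp only []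
        omega
      · left
        simp only []
        omega
      · right
        left
        simp only []
        omega
      · right
        right
        left
        simp only []
        omega
    -- the second walk: 0x115e7f `jmp 113b22`
    u_walk hcode [hμ.vendor] until [Vorbis.L.start_decoder.cut4] span [Vorbis.L.textLo, Vorbis.L.textHi] side (v_side)
    -- 0x113b22: the memory is that of the returned state of `error`, eax = 0
    have habi : abiInv s_115e7f := by
      refine Vorbis.abiInv_of ?_ ?_
      · rw [w_flags]
        exact w_df
      · rw [w_mxcsr]
        exact w_mx
    rw [← w_mem] at hs hun hbits
    refine ReachVia.done (Or.inr (row_fail hb hs hun hok hbits w_rip w_rsp w_eq habi ?_))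
    rw [w_rax]
    rfl

end Vorbis.Spec.start_decoder_R7b

/-- The unit `start_decoder.R7b`: `segR7b_walk` at every entry state. -/
theorem Vorbis.Spec.Worked.start_decoder_R7b_ok : Vorbis.Spec.start_decoder_R7b.Statement := by
  intro Lay hLay μ hμ u₀ hcode hload8 hstore8 h_error g i j E v hat
  obtain ⟨A6, A6c, Ai, Ak, Ad, A, A', hb⟩ := hat
  exact Vorbis.Spec.start_decoder_R7b.segR7b_walk hLay hμ hcode hload8 hstore8 h_error hb
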